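-- pv_equiv track=rewrite | github.com/SystemTeamCodingDojo/Catalan | main.py | is_queue_correct
-- ===== SOURCE A (Python) =====
-- def is_queue_correct(queue):
--     if len(queue) % 2 != 0:
--         return False
--     else:
--         max_nr_of_0s = len(queue) / 2
--     nr_of_0s = 0
--
--     for element in queue:
--         if 0 == element:
--             nr_of_0s += 1
--         else:
--             nr_of_0s -= 1
--
--         if nr_of_0s < 0 or nr_of_0s > max_nr_of_0s:
--             return False
--
--     if nr_of_0s != 0:
--         return False
--
--     return True
-- ===== SOURCE B (Python) =====
-- def is_queue_correct(queue):
--     zeros = [i for i, x in enumerate(queue) if x == 0]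
--     others = [i for i, x in enumerate(queue) if x != 0]
--     if len(zeros) != len(others):
--         return False
--     return all(z < o for z, o in zip(zeros, others))
-- ===== Notes on version B (the rewrite author's own statement) =====
-- stated objective: alternative
-- what changed: A's single running +/-1 balance scan with early exits is replaced by a position-pairing algorithm: collect the index lists of zeros and of non-zeros, require equal counts, and check that the k-th zero's position precedes the k-th non-zero's position (no running balance is maintained).
import Mathlib
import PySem

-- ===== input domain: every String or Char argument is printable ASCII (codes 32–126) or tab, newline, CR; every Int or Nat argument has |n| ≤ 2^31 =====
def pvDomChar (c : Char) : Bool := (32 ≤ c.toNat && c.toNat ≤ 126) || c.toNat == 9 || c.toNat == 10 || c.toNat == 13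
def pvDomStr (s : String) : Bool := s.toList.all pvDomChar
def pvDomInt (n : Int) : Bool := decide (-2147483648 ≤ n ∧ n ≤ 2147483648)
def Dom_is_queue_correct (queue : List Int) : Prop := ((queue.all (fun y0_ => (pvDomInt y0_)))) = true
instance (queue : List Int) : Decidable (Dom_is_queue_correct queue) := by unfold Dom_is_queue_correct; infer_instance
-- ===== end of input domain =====

-- B replaces A's running ±1 balance scan (early exits) by a position-pairing algorithm: collect the index lists of zeros and non-zeros and check equal counts and that the k-th zero precedes the k-th non-zero; objective: alternative, same cost.


-- ===== PORT A =====
-- the for-loop with its two early returns and the trailing nr_of_0s ≠ 0 check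
def isqLoopA (m : Int) (xs : List Int) (acc : Int) : Bool :=
  match xs with
  | [] => acc == 0
  | x :: rest =>
    let acc' := if (0 : Int) == x then acc + 1 else acc - 1
    if acc' < 0 ∨ acc' > m then false else isqLoopA m rest acc'

def is_queue_correct (queue : List Int) : Bool :=
  if queue.length % 2 ≠ 0 then false
  else isqLoopA ((queue.length : Int) / 2) queue 0   -- len(queue)/2 is exact here (length even)

-- ===== PORT B =====
def is_queue_correct_alt (queue : List Int) : Bool :=
  let zeros := ((PySem.List.enumerate queue).filter (fun p => p.2 == 0)).map Prod.fst
  let others := ((PySem.List.enumerate queue).filter (fun p => !(p.2 == 0))).map Prod.fst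
  if zeros.length ≠ others.length then false
  else (zeros.zip others).all (fun p => decide (p.1 < p.2))

-- ===== PRECONDITION & SPEC =====
def Spec_is_queue_correct (queue : List Int) (out : Bool) : Prop := out = is_queue_correct_alt queue
instance (queue : List Int) (out : Bool) : Decidable (Spec_is_queue_correct queue out) := by unfold Spec_is_queue_correct; infer_instance

-- ===== CLAIM (what is proved, stated in full; the proofs are below) =====
def Claim_equal_is_queue_correct : Prop := ∀ (queue : List Int), Dom_is_queue_correct queue → Spec_is_queue_correct queue (is_queue_correct queue)

-- ===== LEMMAS AND PROOFS =====

-- proof-side helpers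
def pvStep (x : Int) : Int := if x = 0 then 1 else -1
def pvBal : List Int → Int
  | [] => 0
  | x :: r => pvStep x + pvBal r
def pvCnt0 (l : List Int) : Nat := l.countP (fun x => x == 0)
def pvCnt1 (l : List Int) : Nat := l.countP (fun x => !(x == 0))
def pvNoDip (acc : Int) : List Int → Bool
  | [] => true
  | x :: r => (decide (0 ≤ acc + pvStep x)) && pvNoDip (acc + pvStep x) r
def pvNoExc (m acc : Int) : List Int → Bool
  | [] => true
  | x :: r => (decide (acc + pvStep x ≤ m)) && pvNoExc m (acc + pvStep x) r
def pvNoDipN (s : Nat) : List Int → Bool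
  | [] => true
  | x :: r => if x = 0 then pvNoDipN (s + 1) r
              else match s with | 0 => false | s' + 1 => pvNoDipN s' r
def pvDv (s : Nat) : List Int → Bool
  | [] => true
  | x :: r => if x = 0 then pvDv (s + 1) r
              else match s with | 0 => pvCnt0 r == 0 | s' + 1 => pvDv s' r

def pvZerosF (k : Int) (l : List Int) : List Int :=
  ((PySem.List.enumerate l k).filter (fun p => p.2 == 0)).map Prod.fst
def pvOthersF (k : Int) (l : List Int) : List Int :=
  ((PySem.List.enumerate l k).filter (fun p => !(p.2 == 0))).map Prod.fst

theorem pvZerosF_cons_zero (k : Int) (l : List Int) :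
    pvZerosF k (0 :: l) = k :: pvZerosF (k + 1) l := by
  simp [pvZerosF, PySem.List.enumerate_cons]
theorem pvZerosF_cons_nz (k : Int) (x : Int) (hx : x ≠ 0) (l : List Int) :
    pvZerosF k (x :: l) = pvZerosF (k + 1) l := by
  simp [pvZerosF, PySem.List.enumerate_cons, hx]
theorem pvOthersF_cons_zero (k : Int) (l : List Int) :
    pvOthersF k (0 :: l) = pvOthersF (k + 1) l := by
  simp [pvOthersF, PySem.List.enumerate_cons]
theorem pvOthersF_cons_nz (k : Int) (x : Int) (hx : x ≠ 0) (l : List Int) :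
    pvOthersF k (x :: l) = k :: pvOthersF (k + 1) l := by
  simp [pvOthersF, PySem.List.enumerate_cons, hx]

theorem pvZerosF_mem_ge (k : Int) (l : List Int) : ∀ z ∈ pvZerosF k l, k ≤ z := by
  intro z hz
  simp only [pvZerosF, List.mem_map, List.mem_filter] at hz
  obtain ⟨p, ⟨hp, -⟩, rfl⟩ := hz
  obtain ⟨j, hj, rfl⟩ := (PySem.List.mem_enumerate_iff _ _ _).mp hp
  simp
theorem pvOthersF_mem_ge (k : Int) (l : List Int) : ∀ z ∈ pvOthersF k l, k ≤ z := by
  intro z hz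
  simp only [pvOthersF, List.mem_map, List.mem_filter] at hz
  obtain ⟨p, ⟨hp, -⟩, rfl⟩ := hz
  obtain ⟨j, hj, rfl⟩ := (PySem.List.mem_enumerate_iff _ _ _).mp hp
  simp

theorem pvZerosF_length (k : Int) (l : List Int) : (pvZerosF k l).length = pvCnt0 l := by
  induction l generalizing k with
  | nil => simp [pvZerosF, pvCnt0, PySem.List.enumerate]
  | cons x r ih =>
    by_cases hx : x = 0
    · subst hx; rw [pvZerosF_cons_zero]; simp only [List.length_cons, ih (k+1), pvCnt0, List.countP_cons]; simp
    · rw [pvZerosF_cons_nz k x hx]; simp only [ih (k+1), pvCnt0, List.countP_cons]; simp [hx]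
theorem pvOthersF_length (k : Int) (l : List Int) : (pvOthersF k l).length = pvCnt1 l := by
  induction l generalizing k with
  | nil => simp [pvOthersF, pvCnt1, PySem.List.enumerate]
  | cons x r ih =>
    by_cases hx : x = 0
    · subst hx; rw [pvOthersF_cons_zero]; simp only [ih (k+1), pvCnt1, List.countP_cons]; simp
    · rw [pvOthersF_cons_nz k x hx]; simp only [List.length_cons, ih (k+1), pvCnt1, List.countP_cons]; simp [hx]

theorem pvZerosF_eq_nil_iff (k : Int) (l : List Int) : pvZerosF k l = [] ↔ pvCnt0 l = 0 := by
  rw [← List.length_eq_zero_iff, pvZerosF_length]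

-- the pairing check equals the shift-automaton pvDv
theorem pvPairing_eq_Dv (l : List Int) (k : Int) (s : Nat) :
    (((pvZerosF k l).zip ((pvOthersF k l).drop s)).all (fun p => decide (p.1 < p.2))) = pvDv s l := by
  induction l generalizing k s with
  | nil => simp [pvZerosF, pvOthersF, pvDv, PySem.List.enumerate]
  | cons x r ih =>
    by_cases hx : x = 0
    · subst hx
      rw [pvZerosF_cons_zero, pvOthersF_cons_zero]
      show (((k :: pvZerosF (k+1) r).zip ((pvOthersF (k+1) r).drop s)).all _) = pvDv (s+1) r
      cases hd : (pvOthersF (k+1) r).drop s with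
      | nil =>
        have : (pvOthersF (k+1) r).drop (s+1) = [] := by
          rw [← List.drop_drop]; simp [hd]
        rw [← ih (k+1) (s+1)]; simp [this]
      | cons o rest =>
        have hrest : (pvOthersF (k+1) r).drop (s+1) = rest := by
          rw [← List.drop_drop]; simp [hd]
        have ho : k < o := by
          have : o ∈ pvOthersF (k+1) r := List.mem_of_mem_drop (hd ▸ List.mem_cons_self)
          have := pvOthersF_mem_ge (k+1) r o this; omega
        rw [List.zip_cons_cons, List.all_cons, ← hrest, ih (k+1) (s+1)]
        simp [ho]
    · rw [pvZerosF_cons_nz k x hx, pvOthersF_cons_nz k x hx]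
      cases s with
      | zero =>
        show (((pvZerosF (k+1) r).zip (k :: pvOthersF (k+1) r)).all _) = pvDv 0 (x :: r)
        cases hz : pvZerosF (k+1) r with
        | nil =>
          have : pvCnt0 r = 0 := (pvZerosF_eq_nil_iff (k+1) r).mp hz
          simp [pvDv, hx, this]
        | cons z zs =>
          have hzk : z ∈ pvZerosF (k+1) r := hz ▸ List.mem_cons_self
          have : k + 1 ≤ z := pvZerosF_mem_ge (k+1) r z hzk
          have hcnt : pvCnt0 r ≠ 0 := by
            intro h0
            rw [← pvZerosF_eq_nil_iff (k+1)] at h0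
            simp [h0] at hz
          have hlt : decide (z < k) = false := by
            simp only [decide_eq_false_iff_not]; omega
          rw [List.zip_cons_cons, List.all_cons, hlt]
          simp [pvDv, hx, hcnt]
      | succ s' =>
        show (((pvZerosF (k+1) r).zip ((k :: pvOthersF (k+1) r).drop (s'+1))).all _) = pvDv (s'+1) (x :: r)
        rw [List.drop_succ_cons]
        simp only [pvDv, hx, if_neg hx]
        exact ih (k+1) s'

-- A's loop = prefix lower bound ∧ prefix upper bound ∧ final balance zero
theorem pvLoopA_char (l : List Int) (m acc : Int) :
    isqLoopA m l acc = (pvNoDip acc l && (pvNoExc m acc l && (acc + pvBal l == 0))) := by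
  induction l generalizing acc with
  | nil => simp [isqLoopA, pvNoDip, pvNoExc, pvBal]
  | cons x r ih =>
    have hs : (if (0 : Int) == x then acc + 1 else acc - 1) = acc + pvStep x := by
      by_cases h : x = 0
      · simp [h, pvStep]
      · have h0 : ((0 : Int) == x) = false := by
          simp only [beq_eq_false_iff_ne]; omega
        simp [h0, pvStep, h]; omega
    simp only [isqLoopA, hs, pvNoDip, pvNoExc, pvBal]
    by_cases hb : acc + pvStep x < 0 ∨ acc + pvStep x > m
    · rw [if_pos hb]
      rcases hb with h | h
      · have : decide (0 ≤ acc + pvStep x) = false := by simp; omega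
        simp [this]
      · have : decide (acc + pvStep x ≤ m) = false := by simp; omega
        simp [this]
    · rw [if_neg hb]
      push_neg at hb
      have h1 : decide (0 ≤ acc + pvStep x) = true := by simp; omega
      have h2 : decide (acc + pvStep x ≤ m) = true := by simp; omega
      rw [h1, h2, ih (acc + pvStep x)]
      simp [add_assoc]

theorem pvNoExc_true (l : List Int) (m acc : Int) (h : acc + pvCnt0 l ≤ m) :
    pvNoExc m acc l = true := by
  induction l generalizing acc with
  | nil => simp [pvNoExc]
  | cons x r ih =>
    have hc : (pvCnt0 (x :: r) : Int) = (if x = 0 then 1 else 0) + pvCnt0 r := by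
      by_cases hx : x = 0 <;> simp [pvCnt0, List.countP_cons, hx] <;> push_cast <;> ring
    have hstep : acc + pvStep x + (pvCnt0 r : Int) ≤ m := by
      rw [hc] at h
      by_cases hx : x = 0
      · rw [if_pos hx] at h; simp only [pvStep, if_pos hx]; omega
      · rw [if_neg hx] at h; simp only [pvStep, if_neg hx]; omega
    have hnonneg : (0 : Int) ≤ (pvCnt0 r : Int) := by positivity
    simp only [pvNoExc, Bool.and_eq_true, decide_eq_true_eq]
    exact ⟨by omega, ih (acc + pvStep x) hstep⟩

theorem pvCnt0_cons (x : Int) (r : List Int) :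
    pvCnt0 (x :: r) = pvCnt0 r + (if x = 0 then 1 else 0) := by
  simp [pvCnt0, List.countP_cons]

theorem pvCnt1_cons (x : Int) (r : List Int) :
    pvCnt1 (x :: r) = pvCnt1 r + (if x = 0 then 0 else 1) := by
  by_cases hx : x = 0 <;> simp [pvCnt1, List.countP_cons, hx]

theorem pvNoDip_natCast (l : List Int) (s : Nat) : pvNoDip (s : Int) l = pvNoDipN s l := by
  induction l generalizing s with
  | nil => simp [pvNoDip, pvNoDipN]
  | cons x r ih =>
    by_cases hx : x = 0
    · subst hx
      have h1 : ((s : Int) + pvStep 0) = ((s + 1 : Nat) : Int) := by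
        simp [pvStep]
      have h2 : decide (0 ≤ ((s + 1 : Nat) : Int)) = true := by
        simp only [decide_eq_true_eq]; positivity
      simp only [pvNoDip, pvNoDipN, if_pos rfl, h1, h2, Bool.true_and]
      exact ih (s + 1)
    · have hst : pvStep x = -1 := by simp [pvStep, hx]
      cases s with
      | zero =>
        have h2 : decide (0 ≤ ((0 : Nat) : Int) + pvStep x) = false := by rw [hst]; simp
        simp only [pvNoDip, pvNoDipN, if_neg hx, h2, Bool.false_and]
      | succ s' =>
        have h1 : (((s' + 1 : Nat) : Int) + pvStep x) = ((s' : Nat) : Int) := by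
          rw [hst]; omega
        have h2 : decide (0 ≤ ((s' + 1 : Nat) : Int) + pvStep x) = true := by
          rw [h1]; simp only [decide_eq_true_eq]; positivity
        simp only [pvNoDip, pvNoDipN, if_neg hx, h1, h2, Bool.true_and]
        exact ih s'

theorem pvDv_eq_noDipN (l : List Int) (s : Nat) (h : pvCnt1 l = pvCnt0 l + s) :
    pvDv s l = pvNoDipN s l := by
  induction l generalizing s with
  | nil => simp [pvDv, pvNoDipN]
  | cons x r ih =>
    rw [pvCnt0_cons, pvCnt1_cons] at h
    by_cases hx : x = 0
    · rw [if_pos hx, if_pos hx] at h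
      have h' : pvCnt1 r = pvCnt0 r + (s + 1) := by omega
      simp [pvDv, pvNoDipN, hx, ih (s+1) h']
    · rw [if_neg hx, if_neg hx] at h
      cases s with
      | zero =>
        have : pvCnt0 r ≠ 0 := by omega
        simp [pvDv, pvNoDipN, hx, this]
      | succ s' =>
        have h' : pvCnt1 r = pvCnt0 r + s' := by omega
        simp [pvDv, pvNoDipN, hx, ih s' h']

theorem pvBal_eq (l : List Int) : pvBal l = (pvCnt0 l : Int) - (pvCnt1 l : Int) := by
  induction l with
  | nil => simp [pvBal, pvCnt0, pvCnt1]
  | cons x r ih =>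
    by_cases hx : x = 0 <;>
      simp [pvBal, pvStep, pvCnt0, pvCnt1, List.countP_cons, hx, ih] <;> push_cast <;> ring

theorem pvLen_eq (l : List Int) : l.length = pvCnt0 l + pvCnt1 l := by
  induction l with
  | nil => simp [pvCnt0, pvCnt1]
  | cons x r ih =>
    by_cases hx : x = 0 <;> simp [pvCnt0, pvCnt1, List.countP_cons, hx] at ih ⊢ <;> omega

-- ===== VERDICT (by name: the statement is the Claim_ definition above) =====
theorem is_queue_correct_spec : Claim_equal_is_queue_correct := by
  intro queue _
  unfold Spec_is_queue_correct is_queue_correct is_queue_correct_alt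
  have hzl : (((PySem.List.enumerate queue).filter (fun p => p.2 == 0)).map Prod.fst) = pvZerosF 0 queue := rfl
  have hol : (((PySem.List.enumerate queue).filter (fun p => !(p.2 == 0))).map Prod.fst) = pvOthersF 0 queue := rfl
  simp only [hzl, hol, pvZerosF_length, pvOthersF_length]
  by_cases hc : pvCnt0 queue = pvCnt1 queue
  · -- counts equal: length even, upper bound is slack, both sides are the no-dip check
    have hlen : queue.length = 2 * pvCnt0 queue := by rw [pvLen_eq]; omega
    have hpar : ¬ queue.length % 2 ≠ 0 := by omega
    have hm : ((queue.length : Int)) / 2 = (pvCnt0 queue : Int) := by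
      rw [hlen]; push_cast; omega
    rw [if_neg hpar, if_neg (by omega : ¬ pvCnt0 queue ≠ pvCnt1 queue)]
    rw [pvLoopA_char, hm]
    have hexc : pvNoExc ((pvCnt0 queue : Int)) 0 queue = true :=
      pvNoExc_true queue _ 0 (by omega)
    have hbal : ((0 : Int) + pvBal queue == 0) = true := by
      rw [pvBal_eq]; simp; omega
    rw [hexc, hbal]
    rw [Bool.and_true, Bool.and_true]
    have hA : pvNoDip (0 : Int) queue = pvNoDipN 0 queue := by
      have := pvNoDip_natCast queue 0
      simpa using this
    have hB : (((pvZerosF 0 queue).zip (pvOthersF 0 queue)).all (fun p => decide (p.1 < p.2))) = pvDv 0 queue := by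
      have := pvPairing_eq_Dv queue 0 0
      simpa using this
    rw [hA, hB, pvDv_eq_noDipN queue 0 (by omega)]
  · -- counts differ: both sides are false
    rw [if_pos hc]
    by_cases hpar : queue.length % 2 ≠ 0
    · rw [if_pos hpar]
    · rw [if_neg hpar, pvLoopA_char]
      have hbal : ((0 : Int) + pvBal queue == 0) = false := by
        rw [pvBal_eq]; simp; omega
      rw [hbal]
      simp
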